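-- pv_equiv track=rewrite | github.com/sieukim/algorithm-programmers | level2/ex75.py | solution
-- ===== SOURCE A (Python) =====
-- from collections import Counter
-- from heapq import heapify, heappop
--
-- def solution(k, tangerine):
--     # 맥스힙 만들기
--     def maxheapify(arr):
--         arr = [-value for value in arr]
--         heapify(arr)
--         return arr
--
--     # 맥스힙 pop
--     def maxheappop(maxheap):
--         return -heappop(maxheap)
--
--     # 각 사이즈별 개수
--     counter = Counter(tangerine).values()
--     counter = maxheapify(counter)
--     # 서로 다른 종류의 수
--     types = 0
--
--     while k > 0:
--         k -= maxheappop(counter)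
--         types += 1
--
--     return types
-- ===== SOURCE B (Python) =====
-- from collections import Counter
--
-- def solution(k, tangerine):
--     counts = sorted(Counter(tangerine).values(), reverse=True)
--     types = 0
--     while k > 0:
--         k -= counts[types]   # IndexError if counts run out while k > 0, like A's heappop on empty
--         types += 1
--     return types
-- ===== Notes on version B (the rewrite author's own statement) =====
-- stated objective: simpler
-- what changed: B replaces A's max-heap with repeated pops by sorting the frequency counts descending once and walking them with an index; same IndexError behaviour when the counts run out.
import Mathlib
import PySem

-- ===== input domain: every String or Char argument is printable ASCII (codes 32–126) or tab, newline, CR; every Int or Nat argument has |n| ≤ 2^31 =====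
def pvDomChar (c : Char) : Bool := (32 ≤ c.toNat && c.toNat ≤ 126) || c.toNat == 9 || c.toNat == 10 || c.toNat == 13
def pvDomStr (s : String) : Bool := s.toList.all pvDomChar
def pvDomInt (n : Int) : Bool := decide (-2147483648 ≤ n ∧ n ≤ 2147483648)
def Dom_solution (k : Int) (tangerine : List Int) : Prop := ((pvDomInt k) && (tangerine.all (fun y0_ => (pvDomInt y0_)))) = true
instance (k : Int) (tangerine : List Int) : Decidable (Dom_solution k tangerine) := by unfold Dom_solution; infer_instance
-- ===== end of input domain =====

-- B replaces A's max-heap with repeated pops by sorting the frequency counts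
-- descending once and walking them with an index; same objective: simpler.

-- ===== PORT A =====
-- A's heapq min-heap is ported as a priority-queue model: the heap is the plain
-- list, heappop returns the minimum (PySem.List.min?) and removes its first
-- occurrence (List.erase). This is exact for the value sequence A observes:
-- heappop on a heapified list always yields the least element, ties are equal
-- Int values, and A never inspects the heap other than by popping.
-- The `none` branch is where Python's heappop raises IndexError (empty heap);
-- Pre_solution excludes exactly those inputs.
-- termination helper for heapLoop (cited in its decreasing_by)
lemma erase_length_lt {xs : List Int} {m : Int} (h : m ∈ xs) :
    (xs.erase m).length < xs.length := by
  rw [List.length_erase]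
  simp [h]
  cases xs with
  | nil => simp at h
  | cons a t => simp

def heapLoop (k : Int) (heap : List Int) (types : Int) : Int :=
  if k ≤ 0 then types
  else
    match h : PySem.List.min? heap (fun x => x) with
    | none => types          -- Python: IndexError (outside Pre_solution)
    | some m => heapLoop (k - (-m)) (heap.erase m) (types + 1)
termination_by heap.length
decreasing_by
  exact erase_length_lt (PySem.List.min?_mem h)

def solution (k : Int) (tangerine : List Int) : Int :=
  -- counter = Counter(tangerine).values(); counter = maxheapify(counter)
  let counter := (PySem.Dict.counter tangerine).values
  let heap := counter.map (fun v => -v)   -- maxheapify: negate, then heapify (model above)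
  heapLoop k heap 0

-- ===== PORT B =====
-- while k > 0: k -= counts[types]; types += 1  — an index walk from 0, ported as
-- structural recursion down the sorted list; `[]` with k > 0 is Python's
-- IndexError (outside Pre_solution).
def altWalk (k : Int) (counts : List Int) (types : Int) : Int :=
  if k ≤ 0 then types
  else
    match counts with
    | [] => types            -- Python: IndexError (outside Pre_solution)
    | c :: rest => altWalk (k - c) rest (types + 1)

def solution_alt (k : Int) (tangerine : List Int) : Int :=
  let counts := PySem.List.sorted (PySem.Dict.counter tangerine).values (fun x => x) true
  altWalk k counts 0

-- ===== PRECONDITION & SPEC =====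
-- Both programs raise IndexError exactly when k exceeds the total number of
-- tangerines (the counts sum to tangerine.length); Pre_ excludes those inputs.
def Pre_solution (k : Int) (tangerine : List Int) : Prop := k ≤ (tangerine.length : Int)
instance (k : Int) (tangerine : List Int) : Decidable (Pre_solution k tangerine) := by
  unfold Pre_solution; infer_instance
def pvWitness_solution : Int × List Int := (2, [1, 1, 2, 3])

def Spec_solution (k : Int) (tangerine : List Int) (out : Int) : Prop := out = solution_alt k tangerine
instance (k : Int) (tangerine : List Int) (out : Int) : Decidable (Spec_solution k tangerine out) := by unfold Spec_solution; infer_instance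

-- ===== CLAIM (what is proved, stated in full; the proofs are below) =====
def Claim_equal_solution : Prop := ∀ (k : Int) (tangerine : List Int), Dom_solution k tangerine → Pre_solution k tangerine → Spec_solution k tangerine (solution k tangerine)

-- ===== LEMMAS AND PROOFS =====

-- erasing the head of an ascending sort sorts the erased list
lemma sorted_erase_head (xs : List Int) (m : Int) (rest : List Int)
    (h : PySem.List.sorted xs (fun x => x) false = m :: rest) :
    PySem.List.sorted (xs.erase m) (fun x => x) false = rest := by
  have hperm : (m :: rest).Perm xs := by
    have := PySem.List.sorted_perm xs (fun x => x) false
    rwa [h] at this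
  have hpw : (m :: rest).Pairwise (fun a b => (a : Int) ≤ b) := by
    have := PySem.List.sorted_pairwise xs (fun x => x)
    rwa [h] at this
  exact PySem.List.sorted_id_eq_of_perm_of_pairwise _ _
    ((List.cons_perm_iff_perm_erase.mp hperm).2) hpw.of_cons

-- min? returns the head value of the ascending sort
lemma min?_eq_sorted_head (xs : List Int) (m : Int) (rest : List Int)
    (h : PySem.List.sorted xs (fun x => x) false = m :: rest) :
    PySem.List.min? xs (fun x => x) = some m := by
  have hmmem : m ∈ xs := by
    have := PySem.List.mem_sorted xs (fun x => x) false m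
    rw [h] at this
    exact this.mp (List.mem_cons_self ..)
  have hne : xs ≠ [] := by
    intro hx
    rw [hx] at hmmem
    simp at hmmem
  obtain ⟨m', hm'⟩ : ∃ m', PySem.List.min? xs (fun x => x) = some m' := by
    cases hmin : PySem.List.min? xs (fun x => x) with
    | none => exact absurd ((PySem.List.min?_eq_none_iff xs _).mp hmin) hne
    | some m' => exact ⟨m', rfl⟩
  have hm'mem : m' ∈ xs := PySem.List.min?_mem hm'
  have h1 : m ≤ m' := PySem.List.key_head_sorted_le xs (fun x => x) h m' hm'mem
  have h2 : m' ≤ m := PySem.List.min?_isMin hm' m hmmem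
  rw [hm', le_antisymm h2 h1]

-- repeated min-extraction equals walking the negated ascending sort
lemma heapLoop_eq_altWalk (xs : List Int) (k types : Int) :
    heapLoop k xs types
      = altWalk k ((PySem.List.sorted xs (fun x => x) false).map (fun m => -m)) types := by
  induction hn : xs.length using Nat.strong_induction_on generalizing xs k types with
  | _ n ih =>
    rw [heapLoop, altWalk.eq_def]
    by_cases hk : k ≤ 0
    · simp [hk]
    · simp only [hk, if_false]
      cases hs : PySem.List.sorted xs (fun x => x) false with
      | nil =>
        have hx : xs = [] := (PySem.List.sorted_eq_nil_iff xs _ false).mp hs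
        subst hx
        have hmin : PySem.List.min? ([] : List Int) (fun x => x) = none :=
          (PySem.List.min?_eq_none_iff _ _).mpr rfl
        simp only [List.map_nil]
        split
        · rfl
        · rename_i m hsome
          rw [hmin] at hsome
          cases hsome
      | cons m rest =>
        rw [min?_eq_sorted_head xs m rest hs]
        simp only [List.map_cons]
        have hrec := sorted_erase_head xs m rest hs
        have hmem : m ∈ xs := by
          have := PySem.List.mem_sorted xs (fun x => x) false m
          rw [hs] at this
          exact this.mp (List.mem_cons_self ..)
        have hlt : (xs.erase m).length < n := by
          rw [← hn]; exact erase_length_lt hmem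
        have := ih _ hlt (xs.erase m) (k - (-m)) (types + 1) rfl
        rw [hrec] at this
        exact this

-- sorting the negated list ascending = negating the descending sort
lemma sorted_neg (xs : List Int) :
    PySem.List.sorted (xs.map (fun v => -v)) (fun x => x) false
      = (PySem.List.sorted xs (fun x => x) true).map (fun m => -m) := by
  apply PySem.List.sorted_id_eq_of_perm_of_pairwise
  · exact (PySem.List.sorted_perm xs (fun x => x) true).map _
  · have := PySem.List.sorted_pairwise_rev xs (fun x => x)
    exact (List.pairwise_map).mpr (this.imp (fun h => by omega))

-- ===== VERDICT (by name: the statement is the Claim_ definition above) =====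
theorem solution_spec : Claim_equal_solution := by
  intro k tangerine _ _
  unfold Spec_solution solution solution_alt
  rw [heapLoop_eq_altWalk, sorted_neg, List.map_map]
  simp
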